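-- pv_equiv track=rewrite | github.com/sebadevo/INFO-F424 | old_version/version2/main.py | check_valid_sol
-- ===== SOURCE A (Python) =====
-- def check_valid_sol(solution, size, cap, weight, row):
--     for col in range(size):
--         value = 0
--         for rows in range(row):
--             value += solution[rows][col] * weight[rows]
--         if value > cap:
--             return False
--     return True
-- ===== SOURCE B (Python) =====
-- def check_valid_sol(solution, size, cap, weight, row):
--     totals = [0] * size
--     for r in range(row):
--         w = weight[r]
--         totals = [t + w * v for t, v in zip(totals, solution[r])]
--     return all(t <= cap for t in totals)
-- ===== Notes on version B (the rewrite author's own statement) =====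
-- stated objective: alternative
-- what changed: Replaces A's column-major per-column scan with early exit by a row-major pass that maintains an accumulator vector of column totals (one zip per row) and checks the cap only once at the end.
-- outside the precondition, e.g. on check_valid_sol([], 0, 0, [], 1): A returns True, B raises IndexError; on check_valid_sol([[5, 1], [5]], 2, 0, [1, 1], 2): A returns False, B returns False
import Mathlib
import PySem

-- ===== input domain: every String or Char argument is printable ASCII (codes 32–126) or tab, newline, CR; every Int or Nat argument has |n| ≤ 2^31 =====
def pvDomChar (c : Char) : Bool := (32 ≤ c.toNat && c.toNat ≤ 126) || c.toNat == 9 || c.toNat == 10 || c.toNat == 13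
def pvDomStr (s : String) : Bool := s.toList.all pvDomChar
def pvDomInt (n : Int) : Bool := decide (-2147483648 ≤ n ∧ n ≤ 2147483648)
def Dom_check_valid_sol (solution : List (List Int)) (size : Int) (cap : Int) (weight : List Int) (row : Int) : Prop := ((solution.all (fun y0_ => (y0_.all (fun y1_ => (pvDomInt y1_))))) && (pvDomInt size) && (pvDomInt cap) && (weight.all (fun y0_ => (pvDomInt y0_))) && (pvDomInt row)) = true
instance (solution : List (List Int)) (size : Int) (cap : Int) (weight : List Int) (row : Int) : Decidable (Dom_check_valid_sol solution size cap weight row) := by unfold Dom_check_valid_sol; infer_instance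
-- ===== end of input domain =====

-- B replaces A's per-column scan (early exit) by a row-major pass maintaining a vector of
-- column totals, checked against the cap once at the end; same asymptotic cost, no speed claim.


-- ===== PORT A =====
-- inner loop: value accumulated over rows 0..row-1 for the fixed column col
def pvAColVal (solution : List (List Int)) (weight : List Int) (row : Int) (col : Int) : Int :=
  (PySem.List.pyRange 0 row 1).foldl
    (fun value rows =>
      value + PySem.List.pyGetD (PySem.List.pyGetD solution rows []) col 0
                * PySem.List.pyGetD weight rows 0) 0

-- outer loop over the columns, with A's early 'return False'
def pvALoop (solution : List (List Int)) (cap : Int) (weight : List Int) (row : Int) : List Int → Bool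
  | [] => true
  | col :: rest =>
      if pvAColVal solution weight row col > cap then false
      else pvALoop solution cap weight row rest

def check_valid_sol (solution : List (List Int)) (size : Int) (cap : Int) (weight : List Int) (row : Int) : Bool :=
  pvALoop solution cap weight row (PySem.List.pyRange 0 size 1)

-- ===== PORT B =====
-- one row of B: totals = [t + w * v for t, v in zip(totals, solution[r])]
def pvBStep (solution : List (List Int)) (weight : List Int) (ts : List Int) (r : Int) : List Int :=
  List.zipWith (fun t v => t + PySem.List.pyGetD weight r 0 * v) ts (PySem.List.pyGetD solution r [])

def check_valid_sol_alt (solution : List (List Int)) (size : Int) (cap : Int) (weight : List Int) (row : Int) : Bool :=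
  ((PySem.List.pyRange 0 row 1).foldl (pvBStep solution weight)
      (List.replicate size.toNat 0)).all (fun t => decide (t ≤ cap))

-- ===== PRECONDITION & SPEC =====
-- Pre_ excludes inputs with an out-of-range row index or a row shorter than size: there Python A
-- raises IndexError (except on a corner where its early column exit returns False first, where B
-- agrees or raises), and Python B raises IndexError on an out-of-range row index.
def Pre_check_valid_sol (solution : List (List Int)) (size : Int) (cap : Int) (weight : List Int) (row : Int) : Prop :=
  0 < row → (row ≤ (solution.length : Int) ∧ row ≤ (weight.length : Int) ∧
    ∀ l ∈ solution.take row.toNat, size ≤ (l.length : Int))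
instance (solution : List (List Int)) (size : Int) (cap : Int) (weight : List Int) (row : Int) : Decidable (Pre_check_valid_sol solution size cap weight row) := by unfold Pre_check_valid_sol; infer_instance

def pvWitness_check_valid_sol : List (List Int) × Int × Int × List Int × Int := ([[1, 2], [3, 4]], 2, 10, [1, 1], 2)

def Spec_check_valid_sol (solution : List (List Int)) (size : Int) (cap : Int) (weight : List Int) (row : Int) (out : Bool) : Prop := out = check_valid_sol_alt solution size cap weight row
instance (solution : List (List Int)) (size : Int) (cap : Int) (weight : List Int) (row : Int) (out : Bool) : Decidable (Spec_check_valid_sol solution size cap weight row out) := by unfold Spec_check_valid_sol; infer_instance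

-- ===== CLAIM (what is proved, stated in full; the proofs are below) =====
def Claim_equal_check_valid_sol : Prop := ∀ (solution : List (List Int)) (size : Int) (cap : Int) (weight : List Int) (row : Int), Dom_check_valid_sol solution size cap weight row → Pre_check_valid_sol solution size cap weight row → Spec_check_valid_sol solution size cap weight row (check_valid_sol solution size cap weight row)

-- ===== LEMMAS AND PROOFS =====

lemma pvALoop_eq_decide (solution : List (List Int)) (cap : Int) (weight : List Int) (row : Int) (cols : List Int) :
    pvALoop solution cap weight row cols
      = decide (∀ col ∈ cols, pvAColVal solution weight row col ≤ cap) := by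
  induction cols with
  | nil => simp [pvALoop]
  | cons c rest ih =>
    simp only [pvALoop]
    by_cases h : pvAColVal solution weight row c > cap
    · rw [if_pos h]
      symm
      simp only [decide_eq_false_iff_not]
      intro hall
      exact absurd (hall c (by simp)) (by omega)
    · rw [if_neg h, ih, decide_eq_decide]
      constructor
      · intro hall col hcol
        rcases List.mem_cons.mp hcol with rfl | hmem
        · omega
        · exact hall col hmem
      · intro hall col hcol
        exact hall col (List.mem_cons_of_mem _ hcol)

lemma pvBFold (solution : List (List Int)) (weight : List Int) (rs : List Int) (ts : List Int)
    (h : ∀ r ∈ rs, ts.length ≤ (PySem.List.pyGetD solution r []).length) :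
    (rs.foldl (pvBStep solution weight) ts).length = ts.length ∧
    ∀ c : Nat, c < ts.length →
      (rs.foldl (pvBStep solution weight) ts).getD c 0 =
        rs.foldl
          (fun value rows =>
            value + PySem.List.pyGetD (PySem.List.pyGetD solution rows []) (c : Int) 0
                      * PySem.List.pyGetD weight rows 0)
          (ts.getD c 0) := by
  induction rs generalizing ts with
  | nil => exact ⟨rfl, fun c _ => rfl⟩
  | cons r rest ih =>
    have hr : ts.length ≤ (PySem.List.pyGetD solution r []).length := h r (by simp)
    have hlen : (pvBStep solution weight ts r).length = ts.length := by
      simp [pvBStep, Nat.min_eq_left hr]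
    have hrest : ∀ r' ∈ rest, (pvBStep solution weight ts r).length ≤ (PySem.List.pyGetD solution r' []).length := by
      intro r' hr'; rw [hlen]; exact h r' (by simp [hr'])
    obtain ⟨ihlen, ihget⟩ := ih (pvBStep solution weight ts r) hrest
    refine ⟨by simpa [hlen] using ihlen, ?_⟩
    intro c hc
    have hc' : c < (pvBStep solution weight ts r).length := by omega
    have hcs : c < (PySem.List.pyGetD solution r []).length := by omega
    have hstep : (pvBStep solution weight ts r).getD c 0 =
        ts.getD c 0 + PySem.List.pyGetD (PySem.List.pyGetD solution r []) (c : Int) 0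
                        * PySem.List.pyGetD weight r 0 := by
      rw [List.getD_eq_getElem _ _ hc', List.getD_eq_getElem _ _ hc]
      simp only [pvBStep, List.getElem_zipWith]
      have : PySem.List.pyGetD (PySem.List.pyGetD solution r []) (c : Int) 0
          = (PySem.List.pyGetD solution r [])[c] := by
        rw [PySem.List.pyGetD_natCast, List.getD_eq_getElem _ _ hcs]
      rw [this]; ring
    simp only [List.foldl_cons]
    rw [ihget c (by omega), hstep]

theorem check_valid_sol_spec : Claim_equal_check_valid_sol := by
  intro solution size cap weight row _ hpre
  unfold Spec_check_valid_sol check_valid_sol check_valid_sol_alt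
  have hrows : ∀ r ∈ PySem.List.pyRange 0 row 1,
      (List.replicate size.toNat (0 : Int)).length ≤ (PySem.List.pyGetD solution r []).length := by
    intro r hrmem
    rw [PySem.List.mem_pyRange_one] at hrmem
    obtain ⟨hsol, hw, hlens⟩ := hpre (by omega)
    have hrn : r.toNat < solution.length := by omega
    have hget : PySem.List.pyGetD solution r [] = solution[r.toNat] :=
      PySem.List.pyGetD_eq_getElem solution [] (by omega) (by omega)
    have hmem : solution[r.toNat] ∈ solution.take row.toNat := by
      have hlt : r.toNat < (solution.take row.toNat).length := by
        simp [List.length_take]; omega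
      have := List.getElem_mem hlt
      simpa [List.getElem_take] using this
    have := hlens _ hmem
    rw [hget]; simp only [List.length_replicate]; omega
  obtain ⟨hlen, hget⟩ := pvBFold solution weight (PySem.List.pyRange 0 row 1)
    (List.replicate size.toNat 0) hrows
  simp only [List.length_replicate] at hlen hget
  rw [pvALoop_eq_decide]
  set totals := (PySem.List.pyRange 0 row 1).foldl (pvBStep solution weight)
    (List.replicate size.toNat 0) with htotals
  have htget : ∀ c : Nat, c < size.toNat →
      totals.getD c 0 = pvAColVal solution weight row (c : Int) := by
    intro c hc
    rw [hget c hc, List.getD_eq_getElem _ _ (by simpa using hc), List.getElem_replicate]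
    rfl
  have : (totals.all fun t => decide (t ≤ cap))
      = decide (∀ col ∈ PySem.List.pyRange 0 size 1, pvAColVal solution weight row col ≤ cap) := by
    rw [Bool.eq_iff_iff]
    simp only [List.all_eq_true, decide_eq_true_iff]
    constructor
    · intro hall col hcol
      rw [PySem.List.mem_pyRange_one] at hcol
      have hcn : col.toNat < size.toNat := by omega
      have hcl : col.toNat < totals.length := by omega
      have hmem : totals.getD col.toNat 0 ∈ totals := by
        rw [List.getD_eq_getElem _ _ hcl]; exact List.getElem_mem hcl
      have := hall _ hmem
      rw [htget col.toNat hcn] at this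
      have hcast : ((col.toNat : Int)) = col := by omega
      rwa [hcast] at this
    · intro hall t htm
      obtain ⟨i, hi, rfl⟩ := List.getElem_of_mem htm
      have hi' : i < size.toNat := by omega
      rw [← List.getD_eq_getElem _ _ hi, htget i hi']
      exact hall _ (by rw [PySem.List.mem_pyRange_one]; omega)
  rw [this]
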